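-- pv_equiv track=rewrite | github.com/JoePittsy/AdventOfCoce | Day 16/main.py | task_one
-- ===== SOURCE A (Python) =====
-- def task_one(rules, others):
--     rule_list = rules.values()
--
--     def check_validity(number):
--         for rule in rule_list:
--             for sub_rule in rule:
--                 valid = bool(sub_rule[0] <= number <= sub_rule[1])
--                 if valid:
--                     return True
--         return number
--
--     all_invalid = [i for ticket in others for i in list(map(check_validity, ticket)) if i is not True]
--     return sum(all_invalid)
-- ===== SOURCE B (Python) =====
-- def task_one(rules, others):
--     # Flatten all sub-ranges, sort by lower bound, merge overlapping intervals once,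
--     # then make one pass over all ticket numbers testing against the short merged list.
--     ivs = [iv for rule in rules.values() for iv in rule]
--     ivs.sort(key=lambda iv: iv[0])
--     merged = []
--     for lo, hi in ivs:
--         if merged and lo <= merged[-1][1]:
--             merged[-1] = (merged[-1][0], max(merged[-1][1], hi))
--         else:
--             merged.append((lo, hi))
--     total = 0
--     for ticket in others:
--         for n in ticket:
--             if not any(lo <= n <= hi for lo, hi in merged):
--                 total += n
--     return total
-- ===== Notes on version B (the rewrite author's own statement) =====
-- stated objective: faster
-- what changed: Instead of scanning every rule's sub-ranges for every ticket number, B flattens all sub-ranges once, sorts and merges them into a short list of disjoint intervals, then checks each number against that merged list in a single accumulation pass.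
import Mathlib
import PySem

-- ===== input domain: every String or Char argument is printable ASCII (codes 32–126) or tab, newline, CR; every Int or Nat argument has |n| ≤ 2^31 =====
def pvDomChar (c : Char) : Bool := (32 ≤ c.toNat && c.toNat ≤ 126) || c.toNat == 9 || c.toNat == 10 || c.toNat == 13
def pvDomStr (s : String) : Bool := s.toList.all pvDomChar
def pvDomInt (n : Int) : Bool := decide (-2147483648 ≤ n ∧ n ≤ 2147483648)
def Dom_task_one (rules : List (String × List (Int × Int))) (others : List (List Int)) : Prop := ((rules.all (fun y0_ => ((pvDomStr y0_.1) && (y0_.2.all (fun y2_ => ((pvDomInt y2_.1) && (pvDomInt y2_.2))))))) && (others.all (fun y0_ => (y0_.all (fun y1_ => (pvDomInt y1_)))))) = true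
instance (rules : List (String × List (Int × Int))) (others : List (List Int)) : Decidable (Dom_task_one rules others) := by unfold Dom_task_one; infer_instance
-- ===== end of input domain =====

-- B merges the sorted sub-ranges into disjoint intervals once and sums invalid numbers
-- in a single pass over the tickets; same return value as A (no mutation of arguments).

-- ===== PORT A =====
-- check_validity returns True (valid) or the number; encoded as Option Int:
-- none = True (filtered out by 'i is not True'), some n = the number itself.
def task_one (rules : List (String × List (Int × Int))) (others : List (List Int)) : Int :=
  let ruleList := rules.map (·.2)              -- rules.values()
  let check : Int → Option Int := fun n =>
    if ruleList.any (fun rule => rule.any (fun s => decide (s.1 ≤ n) && decide (n ≤ s.2))) then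
      none
    else some n
  let allInvalid := others.flatMap (fun t => (t.map check).filterMap id)
  allInvalid.foldl (· + ·) 0

-- ===== PORT B =====
-- one step of B's merge loop; the accumulator is kept reversed (Python appends at the
-- end and updates merged[-1]; here we cons at the head and reverse at the end)
def pvMergeStep (acc : List (Int × Int)) (iv : Int × Int) : List (Int × Int) :=
  match acc with
  | (a, b) :: t => if iv.1 ≤ b then (a, max b iv.2) :: t else iv :: (a, b) :: t
  | [] => [iv]

def task_one_alt (rules : List (String × List (Int × Int))) (others : List (List Int)) : Int :=
  let ivs := (rules.map (·.2)).flatMap (fun r => r)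
  let sortedIvs := PySem.List.sorted ivs (fun iv => iv.1) false
  let merged := (sortedIvs.foldl pvMergeStep []).reverse
  others.foldl (fun tot t =>
    t.foldl (fun tot n =>
      if merged.any (fun iv => decide (iv.1 ≤ n) && decide (n ≤ iv.2)) then tot else tot + n) tot) 0

-- ===== PRECONDITION & SPEC =====
def Spec_task_one (rules : List (String × List (Int × Int))) (others : List (List Int)) (out : Int) : Prop := out = task_one_alt rules others
instance (rules : List (String × List (Int × Int))) (others : List (List Int)) (out : Int) : Decidable (Spec_task_one rules others out) := by unfold Spec_task_one; infer_instance

-- ===== CLAIM (what is proved, stated in full; the proofs are below) =====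
def Claim_equal_task_one : Prop := ∀ (rules : List (String × List (Int × Int))) (others : List (List Int)), Dom_task_one rules others → Spec_task_one rules others (task_one rules others)

-- ===== LEMMAS AND PROOFS =====

/-- membership of `n` in some interval of `ivs` -/
def pvCov (ivs : List (Int × Int)) (n : Int) : Bool :=
  ivs.any (fun iv => decide (iv.1 ≤ n) && decide (n ≤ iv.2))

theorem pvCov_nil (n : Int) : pvCov [] n = false := rfl

theorem pvCov_cons (iv : Int × Int) (t : List (Int × Int)) (n : Int) :
    pvCov (iv :: t) n = ((decide (iv.1 ≤ n) && decide (n ≤ iv.2)) || pvCov t n) := by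
  simp [pvCov]

theorem pvCov_reverse (ivs : List (Int × Int)) (n : Int) :
    pvCov ivs.reverse n = pvCov ivs n := by
  simp [pvCov]


/-- the merge loop preserves coverage, provided the remaining intervals are sorted by
    lower bound and the head of the (reversed) accumulator starts no later than any of them -/
theorem pvCov_mergeFold (n : Int) (rest : List (Int × Int)) (acc : List (Int × Int))
    (hs : rest.Pairwise (fun x y => x.1 ≤ y.1))
    (ha : ∀ iv ∈ rest, ∀ a ∈ acc.head?, a.1 ≤ iv.1) :
    pvCov (rest.foldl pvMergeStep acc) n = (pvCov acc n || pvCov rest n) := by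
  induction rest generalizing acc with
  | nil => simp [pvCov_nil]
  | cons iv rest ih =>
    rw [List.foldl_cons]
    rw [List.pairwise_cons] at hs
    have hstep : pvCov (pvMergeStep acc iv) n = (pvCov acc n || pvCov (iv :: []) n) ∧
        (∀ jv ∈ rest, ∀ a ∈ (pvMergeStep acc iv).head?, a.1 ≤ jv.1) := by
      match acc with
      | [] =>
        refine ⟨by simp [pvMergeStep, pvCov_cons, pvCov_nil], ?_⟩
        intro jv hjv a hmem
        simp [pvMergeStep] at hmem
        subst hmem
        exact hs.1 jv hjv
      | (a, b) :: t =>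
        have hab : a ≤ iv.1 := ha iv (by simp) (a, b) (by simp)
        by_cases hle : iv.1 ≤ b
        · refine ⟨?_, ?_⟩
          · simp only [pvMergeStep, if_pos hle]
            rw [pvCov_cons, pvCov_cons, pvCov_cons, pvCov_nil]
            have h1 : (decide (a ≤ n) && decide (n ≤ max b iv.2))
                = ((decide (a ≤ n) && decide (n ≤ b)) || (decide (iv.1 ≤ n) && decide (n ≤ iv.2))) := by
              rw [← Bool.decide_and, ← Bool.decide_and, ← Bool.decide_and, ← Bool.decide_or]
              exact decide_eq_decide.mpr (by omega)
            rw [show ((a,b).1) = a from rfl, show ((a,b).2) = b from rfl, h1]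
            cases decide (a ≤ n) && decide (n ≤ b) <;> cases decide (iv.1 ≤ n) && decide (n ≤ iv.2) <;> cases pvCov t n <;> simp
          · intro jv hjv x hmem
            simp [pvMergeStep, if_pos hle] at hmem
            subst hmem
            exact le_trans hab (hs.1 jv hjv)
        · refine ⟨?_, ?_⟩
          · simp only [pvMergeStep, if_neg hle]
            rw [pvCov_cons, pvCov_cons, pvCov_cons, pvCov_nil]
            cases decide (a ≤ n) && decide (n ≤ b) <;> cases decide (iv.1 ≤ n) && decide (n ≤ iv.2) <;> cases pvCov t n <;> simp
          · intro jv hjv x hmem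
            simp [pvMergeStep, if_neg hle] at hmem
            subst hmem
            exact hs.1 jv hjv
    rw [ih (pvMergeStep acc iv) hs.2 hstep.2, hstep.1]
    rw [pvCov_cons, pvCov_cons, pvCov_nil]
    cases pvCov acc n <;> cases pvCov rest n <;> simp

/-- coverage only depends on the members, so sorting does not change it -/
theorem pvCov_sorted (ivs : List (Int × Int)) (n : Int) :
    pvCov (PySem.List.sorted ivs (fun iv => iv.1) false) n = pvCov ivs n := by
  unfold pvCov
  exact (PySem.List.sorted_perm ivs (fun iv => iv.1) false).any_eq

/-- B's per-number test against the merged intervals equals A's nested rule scan -/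
theorem pvCov_merged_eq (rules : List (String × List (Int × Int))) (n : Int) :
    pvCov (((PySem.List.sorted ((rules.map (·.2)).flatMap (fun r => r)) (fun iv => iv.1) false).foldl pvMergeStep []).reverse) n
      = (rules.map (·.2)).any (fun rule => rule.any (fun s => decide (s.1 ≤ n) && decide (n ≤ s.2))) := by
  rw [pvCov_reverse]
  rw [pvCov_mergeFold n _ []
    (PySem.List.sorted_pairwise _ _)
    (by intro iv _ a hmem; simp at hmem)]
  rw [pvCov_nil, Bool.false_or, pvCov_sorted]
  simp [pvCov]

/-- A's map-then-filterMap keeps exactly the numbers failing the predicate -/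
theorem pvFilterMap_check (p : Int → Bool) (t : List Int) :
    (t.map (fun n => if p n then (none : Option Int) else some n)).filterMap id
      = t.filter (fun n => !p n) := by
  induction t with
  | nil => rfl
  | cons x t ih =>
    simp only [List.map_cons, List.filterMap_cons, List.filter_cons]
    by_cases hx : p x
    · simpa [hx] using ih
    · simpa [hx] using ih

theorem pvFoldl_if_filter (p : Int → Bool) (t : List Int) (tot : Int) :
    t.foldl (fun tot n => if p n then tot else tot + n) tot
      = (t.filter (fun n => !p n)).foldl (· + ·) tot := by
  induction t generalizing tot with
  | nil => rfl
  | cons x t ih =>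
    by_cases hx : p x <;> simp [hx, ih]

theorem pvFoldl_add_shift (t : List Int) (a b : Int) :
    t.foldl (· + ·) (a + b) = a + t.foldl (· + ·) b := by
  induction t generalizing b with
  | nil => rfl
  | cons x t ih => simp only [List.foldl_cons]; rw [add_assoc, ih]

/-- B's nested accumulation loop equals `tot +` the sum of A's invalid-number list -/
theorem pvSum_eq (p q : Int → Bool) (hq : ∀ n, q n = p n) (others : List (List Int)) (tot : Int) :
    others.foldl (fun tot t => t.foldl (fun tot n => if q n then tot else tot + n) tot) tot
      = tot + (others.flatMap (fun t =>
          (t.map (fun n => if p n then (none : Option Int) else some n)).filterMap id)).foldl (· + ·) 0 := by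
  induction others generalizing tot with
  | nil => simp
  | cons t os ih =>
    rw [List.foldl_cons, ih, List.flatMap_cons, List.foldl_append]
    simp only [hq, pvFilterMap_check, pvFoldl_if_filter]
    have h1 := pvFoldl_add_shift (t.filter (fun n => !p n)) tot 0
    have h2 := pvFoldl_add_shift (os.flatMap (fun t => t.filter (fun n => !p n)))
      ((t.filter (fun n => !p n)).foldl (· + ·) 0) 0
    simp only [add_zero] at h1 h2
    rw [h1, h2, add_assoc]

-- ===== VERDICT (by name: the statement is the Claim_ definition above) =====
theorem task_one_spec : Claim_equal_task_one := by
  intro rules others _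
  show task_one rules others = task_one_alt rules others
  have h := pvSum_eq
    (fun n => (rules.map (fun x : String × List (Int × Int) => x.2)).any
        (fun rule => rule.any (fun s => decide (s.1 ≤ n) && decide (n ≤ s.2))))
    (fun n => (((PySem.List.sorted ((rules.map (fun x : String × List (Int × Int) => x.2)).flatMap
          (fun r : List (Int × Int) => r)) (fun iv => iv.1) false).foldl pvMergeStep []).reverse).any
        (fun iv => decide (iv.1 ≤ n) && decide (n ≤ iv.2)))
    (fun n => pvCov_merged_eq rules n) others 0
  calc task_one rules others = 0 + task_one rules others := (zero_add _).symm
    _ = task_one_alt rules others := h.symm
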